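-- pv_equiv track=rewrite | github.com/Jiaweihu08/EPI | 6 - Strings/6.10 - sinusoidal_string.py | make_sinusoidal
-- ===== SOURCE A (Python) =====
-- def make_sinusoidal(s):
-- 	result = []
-- 	for i in range(1, len(s), 4):
-- 		result.append(s[i])
--
-- 	for i in range(0, len(s), 2):
-- 		result.append(s[i])
--
-- 	for i in range(3, len(s), 4):
-- 		result.append(s[i])
--
-- 	return ''.join(result)
-- ===== SOURCE B (Python) =====
-- def make_sinusoidal(s):
-- 	first, middle, third = [], [], []
-- 	for i in range(len(s)):
-- 		if i % 4 == 1: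
-- 			first.append(s[i])
-- 		elif i % 2 == 0:
-- 			middle.append(s[i])
-- 		elif i % 4 == 3:
-- 			third.append(s[i])
-- 	return ''.join(first + middle + third)
-- ===== Notes on version B (the rewrite author's own statement) =====
-- stated objective: alternative
-- what changed: Replaces A's three strided passes over the string (steps 4, 2, 4) by a single pass over range(len(s)) that classifies each index by its residue into three buckets joined at the end.
import Mathlib
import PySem

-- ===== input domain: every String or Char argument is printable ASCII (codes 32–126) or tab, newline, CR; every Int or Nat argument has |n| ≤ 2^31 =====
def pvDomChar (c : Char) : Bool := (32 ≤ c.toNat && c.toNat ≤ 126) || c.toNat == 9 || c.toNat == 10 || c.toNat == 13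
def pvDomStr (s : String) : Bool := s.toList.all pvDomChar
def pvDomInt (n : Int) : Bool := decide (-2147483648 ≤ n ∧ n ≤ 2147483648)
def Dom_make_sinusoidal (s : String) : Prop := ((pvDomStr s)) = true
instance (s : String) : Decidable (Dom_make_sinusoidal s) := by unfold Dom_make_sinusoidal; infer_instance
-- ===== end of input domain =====

-- B replaces A's three strided passes (steps 4, 2, 4) by one classifying pass over all indices; alternative decomposition, same cost.


-- ===== PORT A =====
-- three strided loops: range(1,n,4), range(0,n,2), range(3,n,4), each appending s[i] (always in range)
def make_sinusoidal (s : String) : String :=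
  let cs := s.toList
  let n : Int := (cs.length : Int)
  let r1 := (PySem.List.pyRange 1 n 4).foldl (fun acc i => acc ++ [PySem.List.pyGetD cs i ' ']) []
  let r2 := (PySem.List.pyRange 0 n 2).foldl (fun acc i => acc ++ [PySem.List.pyGetD cs i ' ']) r1
  let r3 := (PySem.List.pyRange 3 n 4).foldl (fun acc i => acc ++ [PySem.List.pyGetD cs i ' ']) r2
  String.ofList r3

-- ===== PORT B =====
-- one pass over range(len(s)), classifying each index into one of three buckets by its residue
def make_sinusoidal_alt (s : String) : String :=
  let cs := s.toList
  let n : Int := (cs.length : Int)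
  let st := (PySem.List.pyRange 0 n 1).foldl
    (fun (st : List Char × List Char × List Char) i =>
      if PySem.Int.mod i 4 = 1 then (st.1 ++ [PySem.List.pyGetD cs i ' '], st.2.1, st.2.2)
      else if PySem.Int.mod i 2 = 0 then (st.1, st.2.1 ++ [PySem.List.pyGetD cs i ' '], st.2.2)
      else if PySem.Int.mod i 4 = 3 then (st.1, st.2.1, st.2.2 ++ [PySem.List.pyGetD cs i ' '])
      else st)
    ([], [], [])
  String.ofList (st.1 ++ st.2.1 ++ st.2.2)

-- ===== PRECONDITION & SPEC =====
def Spec_make_sinusoidal (s : String) (out : String) : Prop := out = make_sinusoidal_alt s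
instance (s : String) (out : String) : Decidable (Spec_make_sinusoidal s out) := by unfold Spec_make_sinusoidal; infer_instance

-- ===== CLAIM (what is proved, stated in full; the proofs are below) =====
def Claim_equal_make_sinusoidal : Prop := ∀ (s : String), Dom_make_sinusoidal s → Spec_make_sinusoidal s (make_sinusoidal s)

-- ===== LEMMAS AND PROOFS =====

-- B's single classifying pass produces the three buckets as filters of the index list.
lemma bucket3_foldl (g : Int → Char) (l : List Int) (a b c : List Char) :
    l.foldl
      (fun (st : List Char × List Char × List Char) i =>
        if PySem.Int.mod i 4 = 1 then (st.1 ++ [g i], st.2.1, st.2.2)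
        else if PySem.Int.mod i 2 = 0 then (st.1, st.2.1 ++ [g i], st.2.2)
        else if PySem.Int.mod i 4 = 3 then (st.1, st.2.1, st.2.2 ++ [g i])
        else st)
      (a, b, c)
    = (a ++ (l.filter (fun i => decide (PySem.Int.mod i 4 = 1))).map g,
       b ++ (l.filter (fun i => decide (¬ PySem.Int.mod i 4 = 1 ∧ PySem.Int.mod i 2 = 0))).map g,
       c ++ (l.filter (fun i => decide (¬ PySem.Int.mod i 4 = 1 ∧ ¬ PySem.Int.mod i 2 = 0 ∧ PySem.Int.mod i 4 = 3))).map g) := by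
  induction l generalizing a b c with
  | nil => simp
  | cons x t ih =>
      have m4 : PySem.Int.mod x 4 = x % 4 := PySem.Int.mod_eq_emod_of_pos (by norm_num)
      have m2 : PySem.Int.mod x 2 = x % 2 := PySem.Int.mod_eq_emod_of_pos (by norm_num)
      simp only [List.foldl_cons, List.filter_cons, m4, m2]
      by_cases h1 : x % 4 = 1
      · have h2 : ¬ x % 2 = 0 := by omega
        rw [if_pos h1, ih]
        simp [h1, h2]
      · rw [if_neg h1]
        by_cases h2 : x % 2 = 0
        · rw [if_pos h2, ih]; simp [h1, h2]
        · rw [if_neg h2]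
          by_cases h3 : x % 4 = 3
          · rw [if_pos h3, ih]; simp [h2, h3]
          · rw [if_neg h3, ih]; simp [h1, h2, h3]

-- the indices k < n with k % 4 = 1, in order, are 4*0+1, …, i.e. range(1, n, 4)
lemma filt1 (n : Nat) :
    (List.range n).filter (fun k => decide (k % 4 = 1))
      = (List.range ((n + 2) / 4)).map (fun k => 4 * k + 1) := by
  induction n with
  | zero => simp
  | succ n ih =>
      rw [List.range_succ, List.filter_append, ih]
      by_cases h : n % 4 = 1
      · have h4 : (n + 1 + 2) / 4 = (n + 2) / 4 + 1 := by omega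
        have hn : 4 * ((n + 2) / 4) + 1 = n := by omega
        rw [h4, List.range_succ, List.map_append]
        simp [h, hn]
      · have h4 : (n + 1 + 2) / 4 = (n + 2) / 4 := by omega
        simp [h4, h]

lemma filt2 (n : Nat) :
    (List.range n).filter (fun k => decide (k % 2 = 0))
      = (List.range ((n + 1) / 2)).map (fun k => 2 * k) := by
  induction n with
  | zero => simp
  | succ n ih =>
      rw [List.range_succ, List.filter_append, ih]
      by_cases h : n % 2 = 0
      · have h2 : (n + 1 + 1) / 2 = (n + 1) / 2 + 1 := by omega
        have hn : 2 * ((n + 1) / 2) = n := by omega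
        rw [h2, List.range_succ, List.map_append]
        simp [h, hn]
      · have h2 : (n + 1 + 1) / 2 = (n + 1) / 2 := by omega
        simp [h2, h]

lemma filt3 (n : Nat) :
    (List.range n).filter (fun k => decide (k % 4 = 3))
      = (List.range (n / 4)).map (fun k => 4 * k + 3) := by
  induction n with
  | zero => simp
  | succ n ih =>
      rw [List.range_succ, List.filter_append, ih]
      by_cases h : n % 4 = 3
      · have h4 : (n + 1) / 4 = n / 4 + 1 := by omega
        have hn : 4 * (n / 4) + 3 = n := by omega
        rw [h4, List.range_succ, List.map_append]
        simp [h, hn]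
      · have h4 : (n + 1) / 4 = n / 4 := by omega
        simp [h4, h]

-- B's first bucket is exactly A's range(1, n, 4) pass
lemma bucketA1 (N : Nat) (g : Int → Char) :
    ((PySem.List.pyRange 0 (N:Int) 1).filter (fun i => decide (PySem.Int.mod i 4 = 1))).map g
      = (PySem.List.pyRange 1 (N:Int) 4).map g := by
  have hM : (if (1:Int) < (N:Int) then (((N:Int) - 1 + 4 - 1) / 4).toNat else 0) = (N + 2) / 4 := by
    split_ifs with h <;> omega
  have e1 : (PySem.List.pyRange 0 (N:Int) 1).filter (fun i => decide (PySem.Int.mod i 4 = 1))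
      = (List.range ((N + 2) / 4)).map (fun k => ((4 * k + 1 : Nat) : Int)) := by
    rw [PySem.List.pyRange_zero_natCast, List.filter_map,
        List.filter_congr (fun x _ => by
          simp only [Function.comp, PySem.Int.mod_eq_emod_of_pos (show (0:Int) < 4 by norm_num),
            decide_eq_decide]
          omega : ∀ x ∈ List.range N, _ = (fun k => decide (k % 4 = 1)) x),
        filt1, List.map_map]
    rfl
  have e2 : PySem.List.pyRange 1 (N:Int) 4 = (List.range ((N + 2) / 4)).map (fun (k : Nat) => 1 + 4 * (k:Int)) := by
    rw [PySem.List.pyRange_of_pos 1 (N:Int) (by norm_num), hM]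
  rw [e1, e2, List.map_map, List.map_map]
  exact List.map_congr_left (fun k _ => by simp only [Function.comp]; congr 1; push_cast; ring)

-- B's middle bucket is exactly A's range(0, n, 2) pass (an index with i % 4 = 1 is odd)
lemma bucketA2 (N : Nat) (g : Int → Char) :
    ((PySem.List.pyRange 0 (N:Int) 1).filter
        (fun i => decide (¬ PySem.Int.mod i 4 = 1 ∧ PySem.Int.mod i 2 = 0))).map g
      = (PySem.List.pyRange 0 (N:Int) 2).map g := by
  have hM : (if (0:Int) < (N:Int) then (((N:Int) - 0 + 2 - 1) / 2).toNat else 0) = (N + 1) / 2 := by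
    split_ifs with h <;> omega
  have e1 : (PySem.List.pyRange 0 (N:Int) 1).filter
        (fun i => decide (¬ PySem.Int.mod i 4 = 1 ∧ PySem.Int.mod i 2 = 0))
      = (List.range ((N + 1) / 2)).map (fun k => ((2 * k : Nat) : Int)) := by
    rw [PySem.List.pyRange_zero_natCast, List.filter_map,
        List.filter_congr (fun x _ => by
          simp only [Function.comp, PySem.Int.mod_eq_emod_of_pos (show (0:Int) < 4 by norm_num),
            PySem.Int.mod_eq_emod_of_pos (show (0:Int) < 2 by norm_num), decide_eq_decide]
          omega : ∀ x ∈ List.range N, _ = (fun k => decide (k % 2 = 0)) x),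
        filt2, List.map_map]
    rfl
  have e2 : PySem.List.pyRange 0 (N:Int) 2 = (List.range ((N + 1) / 2)).map (fun (k : Nat) => 0 + 2 * (k:Int)) := by
    rw [PySem.List.pyRange_of_pos 0 (N:Int) (by norm_num), hM]
  rw [e1, e2, List.map_map, List.map_map]
  exact List.map_congr_left (fun k _ => by simp only [Function.comp]; congr 1; push_cast; ring)

-- B's third bucket is exactly A's range(3, n, 4) pass (an index with i % 4 = 3 is odd and not 1 mod 4)
lemma bucketA3 (N : Nat) (g : Int → Char) :
    ((PySem.List.pyRange 0 (N:Int) 1).filter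
        (fun i => decide (¬ PySem.Int.mod i 4 = 1 ∧ ¬ PySem.Int.mod i 2 = 0 ∧ PySem.Int.mod i 4 = 3))).map g
      = (PySem.List.pyRange 3 (N:Int) 4).map g := by
  have hM : (if (3:Int) < (N:Int) then (((N:Int) - 3 + 4 - 1) / 4).toNat else 0) = N / 4 := by
    split_ifs with h <;> omega
  have e1 : (PySem.List.pyRange 0 (N:Int) 1).filter
        (fun i => decide (¬ PySem.Int.mod i 4 = 1 ∧ ¬ PySem.Int.mod i 2 = 0 ∧ PySem.Int.mod i 4 = 3))
      = (List.range (N / 4)).map (fun k => ((4 * k + 3 : Nat) : Int)) := by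
    rw [PySem.List.pyRange_zero_natCast, List.filter_map,
        List.filter_congr (fun x _ => by
          simp only [Function.comp, PySem.Int.mod_eq_emod_of_pos (show (0:Int) < 4 by norm_num),
            PySem.Int.mod_eq_emod_of_pos (show (0:Int) < 2 by norm_num), decide_eq_decide]
          omega : ∀ x ∈ List.range N, _ = (fun k => decide (k % 4 = 3)) x),
        filt3, List.map_map]
    rfl
  have e2 : PySem.List.pyRange 3 (N:Int) 4 = (List.range (N / 4)).map (fun (k : Nat) => 3 + 4 * (k:Int)) := by
    rw [PySem.List.pyRange_of_pos 3 (N:Int) (by norm_num), hM]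
  rw [e1, e2, List.map_map, List.map_map]
  exact List.map_congr_left (fun k _ => by simp only [Function.comp]; congr 1; push_cast; ring)

-- ===== VERDICT (by name: the statement is the Claim_ definition above) =====
theorem make_sinusoidal_spec : Claim_equal_make_sinusoidal := by
  intro s _
  unfold Spec_make_sinusoidal make_sinusoidal make_sinusoidal_alt
  simp only [PySem.List.foldl_append_singleton_eq_map, bucket3_foldl]
  rw [bucketA1, bucketA2, bucketA3]
  simp [List.append_assoc]
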